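-- pv_equiv track=rewrite | github.com/tiutcristian/University-work-UBB | Semester 1/FP/a1-tiutcristian/p3.py | entire_years
-- ===== SOURCE A (Python) =====
-- def is_leap(n: int) -> bool:
--     if n % 400 == 0:
--         return True
--     elif n % 100 == 0:
--         return False
--     elif n % 4 == 0:
--         return True
--     else:
--         return False
--
-- def entire_years(birth_year: int, curr_year: int) -> int:
--     total = 0
--     for year in range(birth_year + 1, curr_year):
--         if is_leap(year):
--             total += 366
--         else:
--             total += 365
--     return total
-- ===== SOURCE B (Python) =====
-- def entire_years(birth_year: int, curr_year: int) -> int: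
--     # Closed form: 365 per year plus the number of leap years in (birth_year, curr_year),
--     # counted by floor-division inclusion-exclusion.
--     lo, hi = birth_year + 1, curr_year - 1
--     if lo > hi:
--         return 0
--     def leaps_upto(n: int) -> int:
--         return n // 4 - n // 100 + n // 400
--     return 365 * (hi - lo + 1) + leaps_upto(hi) - leaps_upto(lo - 1)
-- ===== Notes on version B (the rewrite author's own statement) =====
-- stated objective: faster
-- what changed: Replaces the per-year loop with a closed form: 365 times the year count plus the leap-year count in the open interval computed by floor-division inclusion-exclusion (n//4 - n//100 + n//400).
import Mathlib
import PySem

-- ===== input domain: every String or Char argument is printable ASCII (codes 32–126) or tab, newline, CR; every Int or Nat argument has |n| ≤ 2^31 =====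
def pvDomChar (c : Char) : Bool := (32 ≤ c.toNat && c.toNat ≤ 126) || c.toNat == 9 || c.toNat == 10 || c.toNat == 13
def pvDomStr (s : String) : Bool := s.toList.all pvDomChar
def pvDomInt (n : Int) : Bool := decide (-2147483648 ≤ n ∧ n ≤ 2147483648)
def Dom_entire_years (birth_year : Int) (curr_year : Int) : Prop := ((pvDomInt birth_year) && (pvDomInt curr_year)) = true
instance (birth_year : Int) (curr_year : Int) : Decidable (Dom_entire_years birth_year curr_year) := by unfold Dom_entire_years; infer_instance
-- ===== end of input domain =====

-- B replaces A's per-year loop with a closed form (365·count + leap count by floor-division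
-- inclusion-exclusion); objective: faster (O(1) vs O(n)).

-- ===== PORT A =====
def is_leap (n : Int) : Bool :=
  if PySem.Int.mod n 400 = 0 then true
  else if PySem.Int.mod n 100 = 0 then false
  else if PySem.Int.mod n 4 = 0 then true
  else false

def entire_years (birth_year : Int) (curr_year : Int) : Int :=
  (PySem.List.pyRange (birth_year + 1) curr_year 1).foldl
    (fun total year => if is_leap year then total + 366 else total + 365) 0

-- ===== PORT B =====
def leaps_upto (n : Int) : Int :=
  PySem.Int.floordiv n 4 - PySem.Int.floordiv n 100 + PySem.Int.floordiv n 400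

def entire_years_alt (birth_year : Int) (curr_year : Int) : Int :=
  let lo := birth_year + 1
  let hi := curr_year - 1
  if lo > hi then 0
  else 365 * (hi - lo + 1) + leaps_upto hi - leaps_upto (lo - 1)

-- ===== PRECONDITION & SPEC =====
def Spec_entire_years (birth_year : Int) (curr_year : Int) (out : Int) : Prop := out = entire_years_alt birth_year curr_year
instance (birth_year : Int) (curr_year : Int) (out : Int) : Decidable (Spec_entire_years birth_year curr_year out) := by unfold Spec_entire_years; infer_instance

-- ===== CLAIM (what is proved, stated in full; the proofs are below) =====
def Claim_equal_entire_years : Prop := ∀ (birth_year : Int) (curr_year : Int), Dom_entire_years birth_year curr_year → Spec_entire_years birth_year curr_year (entire_years birth_year curr_year)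

-- ===== LEMMAS AND PROOFS =====

-- one step of the inclusion-exclusion count equals the leap-year indicator
theorem leaps_upto_step (m : Int) :
    leaps_upto m - leaps_upto (m - 1) = (if is_leap m then 1 else 0) := by
  have hm4 : PySem.Int.mod m 4 = m % 4 := PySem.Int.mod_eq_emod_of_pos (by norm_num)
  have hm100 : PySem.Int.mod m 100 = m % 100 := PySem.Int.mod_eq_emod_of_pos (by norm_num)
  have hm400 : PySem.Int.mod m 400 = m % 400 := PySem.Int.mod_eq_emod_of_pos (by norm_num)
  have hd4 : ∀ x : Int, PySem.Int.floordiv x 4 = x / 4 :=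
    fun x => PySem.Int.floordiv_eq_ediv_of_pos (by norm_num)
  have hd100 : ∀ x : Int, PySem.Int.floordiv x 100 = x / 100 :=
    fun x => PySem.Int.floordiv_eq_ediv_of_pos (by norm_num)
  have hd400 : ∀ x : Int, PySem.Int.floordiv x 400 = x / 400 :=
    fun x => PySem.Int.floordiv_eq_ediv_of_pos (by norm_num)
  have h4 : m / 4 - (m - 1) / 4 = (if m % 4 = 0 then (1 : Int) else 0) := by
    split_ifs <;> omega
  have h100 : m / 100 - (m - 1) / 100 = (if m % 100 = 0 then (1 : Int) else 0) := by
    split_ifs <;> omega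
  have h400 : m / 400 - (m - 1) / 400 = (if m % 400 = 0 then (1 : Int) else 0) := by
    split_ifs <;> omega
  simp only [leaps_upto, is_leap, hm4, hm100, hm400, hd4, hd100, hd400]
  split_ifs at h4 h100 h400 ⊢ <;> first | omega | simp_all

theorem sum_days_range (a : Int) (n : Nat) :
    (List.map (fun (k : Nat) => a + (k : Int)) (List.range n)).foldl
      (fun total year => if is_leap year then total + 366 else total + 365) 0
    = 365 * n + leaps_upto (a + n - 1) - leaps_upto (a - 1) := by
  induction n with
  | zero => simp
  | succ n ih =>
    rw [List.range_succ, List.map_append, List.foldl_append, ih]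
    have h := leaps_upto_step (a + (n : Int))
    simp only [List.map_cons, List.map_nil, List.foldl_cons, List.foldl_nil]
    push_cast
    have he : a + ((n : Int) + 1) - 1 = a + (n : Int) := by ring
    rw [he]
    split_ifs at h ⊢ <;> omega

-- ===== VERDICT (by name: the statement is the Claim_ definition above) =====
theorem entire_years_spec : Claim_equal_entire_years := by
  intro b c _
  show entire_years b c = entire_years_alt b c
  unfold entire_years entire_years_alt
  dsimp only
  rw [PySem.List.pyRange_one, sum_days_range]
  by_cases h : b + 1 > c - 1
  · have h0 : (c - (b + 1)).toNat = 0 := by omega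
    rw [h0]
    simp [h]
  · have h0 : ((c - (b + 1)).toNat : Int) = c - b - 1 := by omega
    rw [h0]
    simp only [if_neg h]
    have he : b + 1 + (c - b - 1) - 1 = c - 1 := by ring
    have he2 : b + 1 - 1 = b := by ring
    have he3 : c - 1 - (b + 1) + 1 = c - b - 1 := by ring
    rw [he, he2, he3]
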